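-- pv_equiv track=rewrite | github.com/rodrigocd369/ExercicioFuncao | funcoes_exercicios_diversos.py | todos_diferentes
-- ===== SOURCE A (Python) =====
-- def todos_diferentes(sequencia):
--     # Cria um dicionário vazio para armazenar os elementos da sequência como chaves
--     # e o número de ocorrências de cada elemento como valores
--     elementos = {}
--
--     # Percorre a sequência
--     for elemento in sequencia:
--         # Verifica se o elemento já está no dicionário
--         if elemento in elementos:
--             # Se o elemento já existir no dicionário, significa que há uma duplicata
--             return False
--         else:
--             # Se o elemento não existir no dicionário, adiciona-o com valor 1
--             elementos[elemento] = 1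
--
--     # Se nenhum elemento repetido for encontrado, retorna True
--     return True
-- ===== SOURCE B (Python) =====
-- def todos_diferentes(sequencia):
--     # Idiomatic uniqueness check: materialize the set, compare sizes.
--     return len(set(sequencia)) == len(sequencia)
-- ===== Notes on version B (the rewrite author's own statement) =====
-- stated objective: idiomatic
-- what changed: Replaced the element-by-element dict-membership loop with early exit by the idiomatic one-liner that builds the whole set once and compares its size to the input length.
import Mathlib
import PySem

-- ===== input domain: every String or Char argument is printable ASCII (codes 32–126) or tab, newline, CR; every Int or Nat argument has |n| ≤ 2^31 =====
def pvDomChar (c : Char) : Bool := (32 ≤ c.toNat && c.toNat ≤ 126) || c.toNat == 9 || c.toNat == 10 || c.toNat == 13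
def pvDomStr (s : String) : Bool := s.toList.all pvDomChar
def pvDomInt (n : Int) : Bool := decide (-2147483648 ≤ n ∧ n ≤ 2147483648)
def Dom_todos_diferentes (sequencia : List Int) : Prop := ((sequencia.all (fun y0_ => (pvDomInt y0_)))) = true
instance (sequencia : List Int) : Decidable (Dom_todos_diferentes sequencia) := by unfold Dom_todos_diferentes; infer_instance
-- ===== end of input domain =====

-- B builds the set once and compares sizes (idiomatic); A early-exits on the first duplicate.

-- ===== PORT A =====
-- the 'for elemento in sequencia' loop with the dict 'elementos' as state; early return False
def tdLoop : List Int → PySem.Dict Int Int → Bool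
  | [], _ => true
  | e :: rest, d => if d.contains e then false else tdLoop rest (d.insert e 1)

def todos_diferentes (sequencia : List Int) : Bool :=
  tdLoop sequencia PySem.Dict.empty

-- ===== PORT B =====
def todos_diferentes_alt (sequencia : List Int) : Bool :=
  PySem.Set.len (PySem.Set.ofList sequencia) == PySem.List.len sequencia

-- ===== PRECONDITION & SPEC =====
def Spec_todos_diferentes (sequencia : List Int) (out : Bool) : Prop := out = todos_diferentes_alt sequencia
instance (sequencia : List Int) (out : Bool) : Decidable (Spec_todos_diferentes sequencia out) := by unfold Spec_todos_diferentes; infer_instance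

-- ===== CLAIM (what is proved, stated in full; the proofs are below) =====
def Claim_equal_todos_diferentes : Prop := ∀ (sequencia : List Int), Dom_todos_diferentes sequencia → Spec_todos_diferentes sequencia (todos_diferentes sequencia)

-- ===== LEMMAS AND PROOFS =====

theorem foldl_add_length_le (xs : List Int) (s : PySem.Set Int) :
    (xs.foldl PySem.Set.add s).length ≤ s.length + xs.length := by
  induction xs generalizing s with
  | nil => simp
  | cons x xs ih =>
    simp only [List.foldl_cons]
    refine le_trans (ih _) ?_
    simp only [PySem.Set.add]
    split
    · simp
    · simp; omega


theorem tdLoop_eq (xs : List Int) (d : PySem.Dict Int Int) :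
    tdLoop xs d = decide ((xs.foldl PySem.Set.add d.keys).length = d.keys.length + xs.length) := by
  induction xs generalizing d with
  | nil => simp [tdLoop]
  | cons x xs ih =>
    simp only [tdLoop, List.foldl_cons, List.length_cons]
    by_cases h : d.contains x
    · have hadd : PySem.Set.add d.keys x = d.keys := by
        simp [PySem.Set.add, List.contains_eq_mem, (PySem.Dict.contains_iff_mem_keys d x).mp h]
      rw [if_pos h]
      have hle := foldl_add_length_le xs d.keys
      have hne : ¬ ((xs.foldl PySem.Set.add d.keys).length = d.keys.length + (xs.length + 1)) := by
        omega
      simp [hadd, hne]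
    · have hadd : PySem.Set.add d.keys x = d.keys ++ [x] := by
        have : ¬ x ∈ d.keys := fun hm => h ((PySem.Dict.contains_iff_mem_keys d x).mpr hm)
        simp [PySem.Set.add, List.contains_eq_mem, this]
      have hkeys : (d.insert x 1).keys = d.keys ++ [x] := by
        apply PySem.Dict.keys_insert_of_not_contains
        simpa using h
      rw [if_neg h, ih, hkeys]
      simp only [hadd, List.length_append, List.length_singleton, decide_eq_decide]
      constructor <;> intro hh <;> omega

-- ===== VERDICT (by name: the statement is the Claim_ definition above) =====
theorem todos_diferentes_spec : Claim_equal_todos_diferentes := by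
  intro seq _
  unfold Spec_todos_diferentes todos_diferentes todos_diferentes_alt
  rw [tdLoop_eq]
  simp only [PySem.Dict.keys_empty, List.length_nil, Nat.zero_add, PySem.Set.len,
    PySem.List.len, PySem.Set.ofList_eq_foldl]
  rw [Bool.eq_iff_iff]
  simp
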